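-- pv_equiv track=rewrite | github.com/eliottcassidy2000/math | 04-computation/uT_root_structure.py | make_tournament
-- ===== SOURCE A (Python) =====
-- def make_tournament(n, edges_bits):
--     """Create tournament adjacency matrix from bit encoding."""
--     A = [[0]*n for _ in range(n)]
--     edge_list = [(i,j) for i in range(n) for j in range(i+1,n)]
--     for k, (i,j) in enumerate(edge_list):
--         if edges_bits & (1 << k):
--             A[j][i] = 1
--         else:
--             A[i][j] = 1
--     return A
-- ===== SOURCE B (Python) =====
-- def make_tournament(n, edges_bits):
--     """Create tournament adjacency matrix from bit encoding."""
--     def entry(a, b):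
--         if a < b:
--             k = a * (2 * n - a - 1) // 2 + (b - a - 1)
--             return 0 if (edges_bits >> k) & 1 else 1
--         if b < a:
--             k = b * (2 * n - b - 1) // 2 + (a - b - 1)
--             return (edges_bits >> k) & 1
--         return 0
--     return [[entry(a, b) for b in range(n)] for a in range(n)]
-- ===== Notes on version B (the rewrite author's own statement) =====
-- stated objective: alternative
-- what changed: B drops the materialised edge list, the enumerate counter and all in-place mutation: each matrix entry is computed independently from a closed-form triangular bit index k(i,j) = i*(2n-i-1)//2 + (j-i-1) and a shift-and-mask bit test (edges_bits >> k) & 1, building the rows with nested comprehensions.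
import Mathlib
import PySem

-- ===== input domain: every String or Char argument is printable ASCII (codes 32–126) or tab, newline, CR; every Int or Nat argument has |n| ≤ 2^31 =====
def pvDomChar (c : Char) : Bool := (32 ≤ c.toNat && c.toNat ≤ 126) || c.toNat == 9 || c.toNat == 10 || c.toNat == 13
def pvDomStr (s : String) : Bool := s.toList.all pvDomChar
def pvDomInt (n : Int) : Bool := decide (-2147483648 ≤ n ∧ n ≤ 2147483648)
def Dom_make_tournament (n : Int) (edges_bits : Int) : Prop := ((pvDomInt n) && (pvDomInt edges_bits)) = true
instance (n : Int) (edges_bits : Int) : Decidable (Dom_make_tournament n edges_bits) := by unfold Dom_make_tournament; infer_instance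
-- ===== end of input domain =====

-- B replaces A's edge list + enumerate counter + in-place writes by a closed-form
-- per-entry bit index (triangular numbering): an alternative decomposition, same values.

-- ===== PORT A =====
-- A[r][c] = 1 : read row r, write 1 at column c (all indices reached are in range)
def mkT_write (A : List (List Int)) (r c : Int) : List (List Int) :=
  PySem.List.pySetD A r (PySem.List.pySetD (PySem.List.pyGetD A r []) c 1)

def make_tournament (n : Int) (edges_bits : Int) : List (List Int) :=
  let A0 : List (List Int) :=
    (PySem.List.pyRange 0 n 1).map (fun _ => List.replicate n.toNat (0 : Int))
  let edge_list : List (Int × Int) :=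
    (PySem.List.pyRange 0 n 1).flatMap (fun i =>
      (PySem.List.pyRange (i + 1) n 1).map (fun j => (i, j)))
  -- k from enumerate is ≥ 0, so k.toNat is exact for Python's `1 << k`
  (PySem.List.enumerate edge_list 0).foldl (fun A kp =>
    if PySem.Int.band edges_bits (1 <<< kp.1.toNat) ≠ 0 then
      mkT_write A kp.2.2 kp.2.1
    else
      mkT_write A kp.2.1 kp.2.2) A0

-- ===== PORT B =====
-- entry(a, b) of Source B; the exponent k is ≥ 0 whenever its branch is reached, so toNat is exact
def mkT_entry (n edges_bits a b : Int) : Int :=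
  if a < b then
    let k := PySem.Int.floordiv (a * (2 * n - a - 1)) 2 + (b - a - 1)
    if PySem.Int.band (edges_bits >>> k.toNat) 1 ≠ 0 then 0 else 1
  else if b < a then
    let k := PySem.Int.floordiv (b * (2 * n - b - 1)) 2 + (a - b - 1)
    PySem.Int.band (edges_bits >>> k.toNat) 1
  else 0

def make_tournament_alt (n : Int) (edges_bits : Int) : List (List Int) :=
  (PySem.List.pyRange 0 n 1).map (fun a =>
    (PySem.List.pyRange 0 n 1).map (fun b => mkT_entry n edges_bits a b))

-- ===== PRECONDITION & SPEC =====
def Spec_make_tournament (n : Int) (edges_bits : Int) (out : List (List Int)) : Prop := out = make_tournament_alt n edges_bits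
instance (n : Int) (edges_bits : Int) (out : List (List Int)) : Decidable (Spec_make_tournament n edges_bits out) := by unfold Spec_make_tournament; infer_instance

-- ===== CLAIM (what is proved, stated in full; the proofs are below) =====
def Claim_equal_make_tournament : Prop := ∀ (n : Int) (edges_bits : Int), Dom_make_tournament n edges_bits → Spec_make_tournament n edges_bits (make_tournament n edges_bits)

-- ===== LEMMAS AND PROOFS =====

-- the bit test both versions perform
def mkT_bit (x : Int) (k : Nat) : Prop :=
  PySem.Int.mod (PySem.Int.floordiv x (2 ^ k)) 2 = 1

def TI (n x : Int) : Int := PySem.Int.floordiv (x * (2 * n - x - 1)) 2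

def mkT_tgt (e : Int) (kp : Int × Int × Int) : Int × Int :=
  if PySem.Int.band e (1 <<< kp.1.toNat) ≠ 0 then (kp.2.2, kp.2.1) else kp.2

def mkT_get2 (M : List (List Int)) (a b : Nat) : Int := (M.getD a []).getD b 0

def mkT_block (n i : Int) : List (Int × Int) :=
  (PySem.List.pyRange (i + 1) n 1).map (fun j => (i, j))

theorem mkT_band_iff (x : Int) (k : Nat) :
    (PySem.Int.band x ((2 ^ k : Nat) : Int) ≠ 0) ↔ mkT_bit x k := by
  have hP : (0:Nat) < 2 ^ k := by positivity
  have hPc : ((2:Int) ^ k) = ((2 ^ k : Nat) : Int) := by push_cast; ring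
  have hmd : ∀ m : Nat, (m.testBit k = true ↔ m / 2^k % 2 = 1) := by
    intro m; rw [Nat.testBit_eq_decide_div_mod_eq]; simp
  unfold mkT_bit
  rcases le_or_gt 0 x with hx | hx
  · obtain ⟨m, rfl⟩ := Int.eq_ofNat_of_zero_le hx
    rw [hPc, PySem.Int.floordiv_natCast, PySem.Int.band_natCast,
        Nat.and_two_pow, PySem.Int.mod_eq_emod_of_pos (by norm_num)]
    have h2 := hmd m
    cases hb : m.testBit k <;> rw [hb] at h2 <;> simp only [Bool.toNat] at * <;>
      generalize hq : m / 2 ^ k = q at * <;> simp at h2 ⊢ <;> omega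
  · have hm : x = -((-x - 1).toNat : Int) - 1 := by omega
    set m := (-x - 1).toNat with hmdef
    rw [PySem.Int.band, if_neg (by omega), if_pos (by positivity)]
    have ht : ((2 ^ k : Nat) : Int).toNat = 2 ^ k := Int.toNat_natCast _
    rw [ht]
    have hfd : PySem.Int.floordiv x (2 ^ k) = -((m / 2^k : Nat) : Int) - 1 := by
      rw [(PySem.Int.floordiv_eq_iff_of_pos (by positivity))]
      have hd := Nat.div_add_mod m (2^k)
      have hmod := Nat.mod_lt m hP
      zify at hd hmod
      have hr : (0:Int) ≤ (m:Int) % (2^k:Int) := Int.emod_nonneg _ (by positivity)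
      constructor
      · rw [hm]; push_cast; nlinarith [hd, hmod, hr]
      · rw [hm]; push_cast; nlinarith [hd, hmod, hr]
    rw [hfd, PySem.Int.mod_eq_emod_of_pos (by norm_num), Nat.and_comm, Nat.and_two_pow]
    have h2 := hmd m
    cases hb : m.testBit k <;> rw [hb] at h2 <;> simp only [Bool.toNat] at * <;>
      generalize hq : m / 2 ^ k = q at * <;> simp at h2 ⊢ <;> omega

theorem TI_double (n a : Int) : 2 * TI n a = a * (2 * n - a - 1) := by
  have hdvd : (2:Int) ∣ a * (2 * n - a - 1) := by
    rcases Int.even_or_odd a with he | ho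
    · exact Dvd.dvd.mul_right he.two_dvd _
    · have : Even (2 * n - a - 1) := by
        rcases ho with ⟨t, ht⟩; exact ⟨n - t - 1, by omega⟩
      exact Dvd.dvd.mul_left this.two_dvd _
  rw [TI, PySem.Int.floordiv_eq_ediv_of_pos (by norm_num)]
  exact Int.mul_ediv_cancel' hdvd

theorem TI_succ (n a : Int) : TI n (a + 1) = TI n a + (n - 1 - a) := by
  have h1 := TI_double n a
  have h2 := TI_double n (a + 1)
  have h3 : (a + 1) * (2 * n - (a + 1) - 1) = a * (2 * n - a - 1) + 2 * (n - 1 - a) := by ring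
  linarith

theorem TI_zero (n : Int) : TI n 0 = 0 := by
  have := TI_double n 0; omega

theorem mem_enum_block (n a s k i j : Int) :
    ((k, (i, j)) ∈ PySem.List.enumerate (mkT_block n a) s) ↔
      (i = a ∧ a < j ∧ j < n ∧ k = s + (j - a - 1)) := by
  rw [PySem.List.mem_enumerate_iff]
  constructor
  · rintro ⟨t, ht, hp⟩
    simp only [mkT_block, List.length_map, PySem.List.length_pyRange_one] at ht
    simp only [mkT_block, List.getElem_map, PySem.List.getElem_pyRange_one] at hp
    obtain ⟨hk, hi, hj⟩ : k = s + ↑t ∧ i = a ∧ j = a + 1 + ↑t := by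
      rw [Prod.ext_iff, Prod.ext_iff] at hp; exact ⟨hp.1, hp.2.1, hp.2.2⟩
    omega
  · rintro ⟨hi, haj, hjn, hk⟩
    refine ⟨(j - a - 1).toNat, ?_, ?_⟩
    · simp only [mkT_block, List.length_map, PySem.List.length_pyRange_one]; omega
    · simp only [mkT_block, List.getElem_map, PySem.List.getElem_pyRange_one]
      rw [Prod.ext_iff, Prod.ext_iff]
      refine ⟨by omega, by omega, by simp; omega⟩

theorem mem_enum_flat_block (n : Int) : ∀ (m : Nat) (a s : Int), 0 ≤ a → (n - a).toNat = m →
    ∀ k i j : Int,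
    ((k, (i, j)) ∈ PySem.List.enumerate
        ((PySem.List.pyRange a n 1).flatMap (mkT_block n)) s) ↔
      (a ≤ i ∧ i < j ∧ j < n ∧ k = s + (TI n i - TI n a) + (j - i - 1)) := by
  intro m
  induction m with
  | zero =>
    intro a s ha hm k i j
    rw [PySem.List.pyRange_one_eq_nil (by omega)]
    simp only [List.flatMap_nil]
    constructor
    · intro h; simp [PySem.List.enumerate] at h
    · intro h; omega
  | succ m ih =>
    intro a s ha hm k i j
    have han : a < n := by omega
    rw [PySem.List.pyRange_one_cons han, List.flatMap_cons,
        PySem.List.enumerate_append, List.mem_append, mem_enum_block]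
    have hlen : ((mkT_block n a).length : Int) = n - a - 1 := by
      simp only [mkT_block, List.length_map, PySem.List.length_pyRange_one]; omega
    rw [ih (a + 1) (s + ↑(mkT_block n a).length) (by omega) (by omega) k i j, hlen]
    have hTI := TI_succ n a
    by_cases hi : i = a
    · subst hi; omega
    · omega

theorem pySetD_length {α : Type} (xs : List α) (i : Int) (v : α) :
    (PySem.List.pySetD xs i v).length = xs.length := by
  unfold PySem.List.pySetD PySem.List.pySet?
  cases h : PySem.List.pyIdx? xs.length i <;> simp

theorem mkT_write_length (A : List (List Int)) (r c : Int) :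
    (mkT_write A r c).length = A.length := pySetD_length _ _ _

theorem pyIdx?_lt (n : Nat) (i : Int) (t : Nat)
    (h : PySem.List.pyIdx? n i = some t) : t < n := by
  unfold PySem.List.pyIdx? at h
  split_ifs at h <;> simp at h <;> omega

theorem pySetD_mem {α : Type} (xs : List α) (i : Int) (v : α) :
    ∀ y ∈ PySem.List.pySetD xs i v, y ∈ xs ∨
      (∃ t, PySem.List.pyIdx? xs.length i = some t ∧ y = v) := by
  intro y hy
  unfold PySem.List.pySetD PySem.List.pySet? at hy
  cases h : PySem.List.pyIdx? xs.length i with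
  | none => rw [h] at hy; simp at hy; exact Or.inl hy
  | some t =>
    rw [h] at hy; simp at hy
    rcases List.mem_or_eq_of_mem_set hy with hmem | heq
    · exact Or.inl hmem
    · exact Or.inr ⟨t, rfl, heq⟩

theorem pyGetD_mem_of_idx {α : Type} (xs : List α) (i : Int) (d : α) (t : Nat)
    (h : PySem.List.pyIdx? xs.length i = some t) :
    PySem.List.pyGetD xs i d ∈ xs := by
  have ht := pyIdx?_lt _ _ _ h
  unfold PySem.List.pyGetD PySem.List.pyGet?
  rw [h]
  simp [List.getElem?_eq_getElem ht]

theorem mkT_write_rows {N : Nat} (A : List (List Int)) (r c : Int)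
    (hA : ∀ row ∈ A, row.length = N) :
    ∀ row ∈ mkT_write A r c, row.length = N := by
  intro row hrow
  rcases pySetD_mem _ _ _ row hrow with hmem | ⟨t, ht, heq⟩
  · exact hA row hmem
  · subst heq
    rw [pySetD_length]
    exact hA _ (pyGetD_mem_of_idx _ _ _ _ ht)

theorem pyIdx?_nonneg_some (n : Nat) (i : Int) (t : Nat) (hi : 0 ≤ i)
    (h : PySem.List.pyIdx? n i = some t) : (t : Int) = i ∧ t < n := by
  unfold PySem.List.pyIdx? at h
  split_ifs at h <;> simp at h <;> omega

theorem pyIdx?_nonneg_lt (n : Nat) (i : Int) (hi : 0 ≤ i) (hn : i < n) :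
    PySem.List.pyIdx? n i = some i.toNat := by
  unfold PySem.List.pyIdx?
  rw [if_pos hi, if_pos hn]

theorem pyGetD_nonneg_eq (A : List (List Int)) (a : Nat) (ha : a < A.length) :
    PySem.List.pyGetD A (a : Int) [] = A.getD a [] := by
  unfold PySem.List.pyGetD PySem.List.pyGet?
  rw [pyIdx?_nonneg_lt _ _ (by omega) (by exact_mod_cast ha)]
  simp [List.getD_eq_getElem?_getD, List.getElem?_eq_getElem ha]

theorem getD_set_self {α : Type} (xs : List α) (i : Nat) (v d : α)
    (h : i < xs.length) : (xs.set i v).getD i d = v := by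
  rw [List.getD_eq_getElem?_getD, List.getElem?_set_self (by omega)]; rfl

theorem getD_set_ne {α : Type} (xs : List α) (i j : Nat) (v d : α)
    (h : i ≠ j) : (xs.set i v).getD j d = xs.getD j d := by
  rw [List.getD_eq_getElem?_getD, List.getElem?_set_ne (by omega),
      ← List.getD_eq_getElem?_getD]

theorem get2_write_same (A : List (List Int)) (a b : Nat)
    (ha : a < A.length) (hb : b < (A.getD a []).length) :
    mkT_get2 (mkT_write A (a : Int) (b : Int)) a b = 1 := by
  unfold mkT_write mkT_get2
  rw [pyGetD_nonneg_eq A a ha]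
  unfold PySem.List.pySetD
  rw [PySem.List.pySet?_natCast _ _ _ hb]
  rw [PySem.List.pySet?_natCast _ _ _ ha]
  simp only [Option.getD_some]
  rw [getD_set_self _ _ _ _ ha, getD_set_self _ _ _ _ hb]

theorem get2_write_ne (A : List (List Int)) (r c : Int) (hr : 0 ≤ r) (hc : 0 ≤ c)
    (a b : Nat) (hne : (r, c) ≠ ((a : Int), (b : Int))) :
    mkT_get2 (mkT_write A r c) a b = mkT_get2 A a b := by
  unfold mkT_write mkT_get2 PySem.List.pySetD PySem.List.pySet?
  cases h : PySem.List.pyIdx? A.length r with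
  | none => simp
  | some t =>
    obtain ⟨htr, htn⟩ := pyIdx?_nonneg_some _ _ _ hr h
    simp only [Option.map_some, Option.getD_some]
    by_cases hra : r = (a : Int)
    · have hta : t = a := by omega
      subst hta hra
      rw [getD_set_self _ _ _ _ htn]
      have hcb : c ≠ (b : Int) := by
        intro hcb; exact hne (by rw [hcb])
      rw [pyGetD_nonneg_eq A t htn]
      cases h2 : PySem.List.pyIdx? (A.getD t []).length c with
      | none => simp
      | some u =>
        obtain ⟨huc, hun⟩ := pyIdx?_nonneg_some _ _ _ hc h2
        simp only [Option.map_some, Option.getD_some]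
        rw [getD_set_ne _ _ _ _ _ (by omega)]
    · have hta : t ≠ a := by omega
      exact congrArg (fun l : List Int => l.getD b 0) (getD_set_ne A t a _ [] hta)

theorem fold_write_get2 (N : Nat) : ∀ (ts : List (Int × Int)) (M : List (List Int)),
    M.length = N → (∀ row ∈ M, row.length = N) →
    (∀ p ∈ ts, 0 ≤ p.1 ∧ p.1 < (N : Int) ∧ 0 ≤ p.2 ∧ p.2 < (N : Int)) →
    ∀ a b : Nat, a < N → b < N →
    mkT_get2 (ts.foldl (fun A p => mkT_write A p.1 p.2) M) a b
      = if ((a : Int), (b : Int)) ∈ ts then 1 else mkT_get2 M a b := by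
  intro ts
  induction ts with
  | nil => intro M hL hR hts a b ha hb; simp
  | cons p ts ih =>
    intro M hL hR hts a b ha hb
    obtain ⟨hp1, hp2, hp3, hp4⟩ := hts p List.mem_cons_self
    simp only [List.foldl_cons]
    rw [ih (mkT_write M p.1 p.2)
        (by rw [mkT_write_length]; exact hL)
        (mkT_write_rows _ _ _ hR)
        (fun q hq => hts q (List.mem_cons_of_mem _ hq)) a b ha hb]
    by_cases hmem : ((a : Int), (b : Int)) ∈ ts
    · rw [if_pos hmem, if_pos (List.mem_cons_of_mem _ hmem)]
    · rw [if_neg hmem]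
      by_cases hpab : p = ((a : Int), (b : Int))
      · rw [if_pos (by rw [hpab]; exact List.mem_cons_self)]
        subst hpab
        have haM : a < M.length := by omega
        have hrowlen : (M.getD a []).length = N := by
          have : M.getD a [] ∈ M := by
            rw [List.getD_eq_getElem?_getD, List.getElem?_eq_getElem haM]
            exact List.getElem_mem _
          exact hR _ this
        exact get2_write_same M a b haM (by omega)
      · rw [if_neg (by
          intro hc
          rcases List.mem_cons.mp hc with hc1 | hc2
          · exact hpab hc1.symm
          · exact hmem hc2)]
        exact get2_write_ne M p.1 p.2 hp1 hp3 a b (by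
          intro hc; exact hpab (by
            rcases p with ⟨x, y⟩
            simpa using hc))

theorem mem_enum_flat (n : Int) : ∀ (m : Nat) (a s : Int), 0 ≤ a → (n - a).toNat = m →
    ∀ k i j : Int,
    ((k, (i, j)) ∈ PySem.List.enumerate
        ((PySem.List.pyRange a n 1).flatMap (fun i =>
          (PySem.List.pyRange (i + 1) n 1).map (fun j => (i, j)))) s) ↔
      (a ≤ i ∧ i < j ∧ j < n ∧ k = s + (TI n i - TI n a) + (j - i - 1)) :=
  mem_enum_flat_block n

theorem one_shl_eq (m : Nat) : (((1 <<< m : Nat) : Int)) = ((2 ^ m : Nat) : Int) := by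
  rw [Nat.one_shiftLeft]

-- the enumerate characterisation at a = 0, s = 0
theorem mem_enum_edge (n : Int) (k i j : Int) :
    ((k, (i, j)) ∈ PySem.List.enumerate
        ((PySem.List.pyRange 0 n 1).flatMap (fun i =>
          (PySem.List.pyRange (i + 1) n 1).map (fun j => (i, j)))) 0) ↔
      (0 ≤ i ∧ i < j ∧ j < n ∧ k = TI n i + (j - i - 1)) := by
  rw [mem_enum_flat n (n - 0).toNat 0 0 le_rfl rfl k i j, TI_zero]
  constructor <;> (intro h; exact ⟨h.1, h.2.1, h.2.2.1, by omega⟩)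

-- TI is nonnegative in the range we use it
theorem TI_nonneg (n i : Int) (h0 : 0 ≤ i) (hn : i ≤ n) : 0 ≤ TI n i := by
  rcases eq_or_lt_of_le h0 with h | h
  · rw [← h, TI_zero]
  · have hd := TI_double n i
    nlinarith [mul_nonneg h0 (by omega : (0:Int) ≤ 2 * n - i - 1)]

theorem getElem_eq_getD {α : Type} (xs : List α) (i : Nat) (d : α) (h : i < xs.length) :
    xs[i] = xs.getD i d := by
  simp [List.getD_eq_getElem?_getD, List.getElem?_eq_getElem h]

theorem mem_ts (n e : Int) (a b : Nat) (ha : (a : Int) < n) (hb : (b : Int) < n) :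
    (((a : Int), (b : Int)) ∈
        (PySem.List.enumerate
          ((PySem.List.pyRange 0 n 1).flatMap (fun i =>
            (PySem.List.pyRange (i + 1) n 1).map (fun j => (i, j)))) 0).map (mkT_tgt e)) ↔
      ((a < b ∧ ¬ mkT_bit e (TI n ↑a + (↑b - ↑a - 1)).toNat) ∨
       (b < a ∧ mkT_bit e (TI n ↑b + (↑a - ↑b - 1)).toNat)) := by
  rw [List.mem_map]
  constructor
  · rintro ⟨⟨k, i, j⟩, hkp, htgt⟩
    rw [mem_enum_edge] at hkp
    obtain ⟨hi0, hij, hjn, hk⟩ := hkp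
    unfold mkT_tgt at htgt
    split_ifs at htgt with hband
    · simp only [Prod.mk.injEq] at htgt
      obtain ⟨hja, hib⟩ := htgt
      right
      refine ⟨by omega, ?_⟩
      rw [one_shl_eq] at hband
      have := (mkT_band_iff e k.toNat).mp hband
      rwa [hk, hib, hja] at this
    · simp only [Prod.mk.injEq] at htgt
      obtain ⟨hia, hjb⟩ := htgt
      left
      refine ⟨by omega, ?_⟩
      intro hbit
      apply hband
      rw [one_shl_eq, mkT_band_iff e k.toNat]
      rwa [hk, hia, hjb]
  · have hTa : 0 ≤ TI n ↑a := TI_nonneg n _ (by omega) (by omega)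
    have hTb : 0 ≤ TI n ↑b := TI_nonneg n _ (by omega) (by omega)
    rintro (⟨hab, hbit⟩ | ⟨hba, hbit⟩)
    · refine ⟨(TI n ↑a + (↑b - ↑a - 1), ((a : Int), (b : Int))), ?_, ?_⟩
      · rw [mem_enum_edge]
        exact ⟨by omega, by omega, hb, rfl⟩
      · unfold mkT_tgt
        rw [if_neg]
        intro hband
        exact hbit (by
          have := (mkT_band_iff e _).mp (by rwa [one_shl_eq] at hband)
          exact this)
    · refine ⟨(TI n ↑b + (↑a - ↑b - 1), ((b : Int), (a : Int))), ?_, ?_⟩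
      · rw [mem_enum_edge]
        exact ⟨by omega, by omega, ha, rfl⟩
      · unfold mkT_tgt
        rw [if_pos]
        rw [one_shl_eq, mkT_band_iff e _]
        exact hbit

theorem shr_band_one (x : Int) (k : Nat) :
    PySem.Int.band (x >>> k) 1 = PySem.Int.mod (PySem.Int.floordiv x (2 ^ k)) 2 := by
  rw [PySem.Int.band_one, Int.shiftRight_eq_div_pow,
      PySem.Int.floordiv_eq_ediv_of_pos (by positivity)]
  norm_cast

theorem mod2_cases (x : Int) : PySem.Int.mod x 2 = 0 ∨ PySem.Int.mod x 2 = 1 := by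
  have h1 := PySem.Int.mod_nonneg x (b := 2) (by norm_num)
  have h2 := PySem.Int.mod_lt x (b := 2) (by norm_num)
  omega

theorem ts_point (n e : Int) (a b : Nat) (ha : (a : Int) < n) (hb : (b : Int) < n) :
    (if ((a : Int), (b : Int)) ∈
        (PySem.List.enumerate
          ((PySem.List.pyRange 0 n 1).flatMap (fun i =>
            (PySem.List.pyRange (i + 1) n 1).map (fun j => (i, j)))) 0).map (mkT_tgt e)
      then (1 : Int) else 0) = mkT_entry n e ↑a ↑b := by
  have hiff := mem_ts n e a b ha hb
  unfold mkT_bit TI at hiff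
  have hq1 := mod2_cases (PySem.Int.floordiv e
    (2 ^ (PySem.Int.floordiv ((a : Int) * (2 * n - ↑a - 1)) 2 + (↑b - ↑a - 1)).toNat))
  have hq2 := mod2_cases (PySem.Int.floordiv e
    (2 ^ (PySem.Int.floordiv ((b : Int) * (2 * n - ↑b - 1)) 2 + (↑a - ↑b - 1)).toNat))
  simp only [mkT_entry, shr_band_one]
  by_cases hm : ((a : Int), (b : Int)) ∈
      (PySem.List.enumerate
        ((PySem.List.pyRange 0 n 1).flatMap (fun i =>
          (PySem.List.pyRange (i + 1) n 1).map (fun j => (i, j)))) 0).map (mkT_tgt e)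
  · rw [if_pos hm]
    have hd := hiff.mp hm
    split_ifs <;> omega
  · rw [if_neg hm]
    have hd := (not_congr hiff).mp hm
    split_ifs <;> omega

theorem fold_shape (N : Nat) : ∀ (ts : List (Int × Int)) (M : List (List Int)),
    M.length = N → (∀ row ∈ M, row.length = N) →
    (ts.foldl (fun A p => mkT_write A p.1 p.2) M).length = N ∧
      (∀ row ∈ ts.foldl (fun A p => mkT_write A p.1 p.2) M, row.length = N) := by
  intro ts
  induction ts with
  | nil => intro M hL hR; exact ⟨hL, hR⟩
  | cons p ts ih =>
    intro M hL hR
    simp only [List.foldl_cons]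
    exact ih _ (by rw [mkT_write_length]; exact hL) (mkT_write_rows _ _ _ hR)

theorem ts_bounds (n e : Int) :
    ∀ p ∈ (PySem.List.enumerate
        ((PySem.List.pyRange 0 n 1).flatMap (fun i =>
          (PySem.List.pyRange (i + 1) n 1).map (fun j => (i, j)))) 0).map (mkT_tgt e),
      0 ≤ p.1 ∧ p.1 < ((n.toNat : Nat) : Int) ∧ 0 ≤ p.2 ∧ p.2 < ((n.toNat : Nat) : Int) := by
  intro p hp
  rw [List.mem_map] at hp
  obtain ⟨⟨k, i, j⟩, hkp, htgt⟩ := hp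
  rw [mem_enum_edge] at hkp
  obtain ⟨hi0, hij, hjn, -⟩ := hkp
  have hnN : n ≤ ((n.toNat : Nat) : Int) := Int.self_le_toNat n
  subst htgt
  unfold mkT_tgt
  split_ifs <;> simp <;> omega

theorem step_eq (e : Int) :
    (fun (A : List (List Int)) (kp : Int × Int × Int) =>
      if PySem.Int.band e (1 <<< kp.1.toNat) ≠ 0 then
        mkT_write A kp.2.2 kp.2.1
      else
        mkT_write A kp.2.1 kp.2.2)
    = fun A kp => mkT_write A (mkT_tgt e kp).1 (mkT_tgt e kp).2 := by
  funext A kp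
  unfold mkT_tgt
  split_ifs <;> rfl

theorem make_tournament_eq_alt (n e : Int) :
    make_tournament n e = make_tournament_alt n e := by
  have hunfold : make_tournament n e =
      (PySem.List.enumerate
        ((PySem.List.pyRange 0 n 1).flatMap (fun i =>
          (PySem.List.pyRange (i + 1) n 1).map (fun j => (i, j)))) 0).foldl
        (fun A kp =>
          if PySem.Int.band e (1 <<< kp.1.toNat) ≠ 0 then
            mkT_write A kp.2.2 kp.2.1
          else
            mkT_write A kp.2.1 kp.2.2)
        ((PySem.List.pyRange 0 n 1).map (fun _ => List.replicate n.toNat (0 : Int))) := rfl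
  unfold make_tournament_alt
  have hfm : List.foldl (fun A kp => mkT_write A (mkT_tgt e kp).1 (mkT_tgt e kp).2)
      ((PySem.List.pyRange 0 n 1).map (fun _ => List.replicate n.toNat (0 : Int)))
      (PySem.List.enumerate
        ((PySem.List.pyRange 0 n 1).flatMap (fun i =>
          (PySem.List.pyRange (i + 1) n 1).map (fun j => (i, j)))) 0)
      = List.foldl (fun A p => mkT_write A p.1 p.2)
      ((PySem.List.pyRange 0 n 1).map (fun _ => List.replicate n.toNat (0 : Int)))
      ((PySem.List.enumerate
        ((PySem.List.pyRange 0 n 1).flatMap (fun i =>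
          (PySem.List.pyRange (i + 1) n 1).map (fun j => (i, j)))) 0).map (mkT_tgt e)) :=
    by rw [List.foldl_map]
  rw [hunfold, step_eq e, hfm]
  set N := n.toNat with hN
  set A0 : List (List Int) :=
    (PySem.List.pyRange 0 n 1).map (fun _ => List.replicate n.toNat (0 : Int)) with hA0
  set ts := (PySem.List.enumerate
      ((PySem.List.pyRange 0 n 1).flatMap (fun i =>
        (PySem.List.pyRange (i + 1) n 1).map (fun j => (i, j)))) 0).map (mkT_tgt e) with hts
  have hA0len : A0.length = N := by
    rw [hA0, List.length_map, PySem.List.length_pyRange_one]; omega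
  have hA0rows : ∀ row ∈ A0, row.length = N := by
    intro row hrow
    rw [hA0] at hrow
    rcases List.mem_map.mp hrow with ⟨_, -, rfl⟩
    exact List.length_replicate
  obtain ⟨hFlen, hFrows⟩ := fold_shape N ts A0 hA0len hA0rows
  apply List.ext_getElem
  · rw [hFlen, List.length_map, PySem.List.length_pyRange_one]; omega
  · intro a h1 h2
    have haN : a < N := by omega
    have han : (a : Int) < n := by
      have : a < (PySem.List.pyRange 0 n 1).length := by rwa [List.length_map] at h2
      rw [PySem.List.length_pyRange_one] at this; omega
    rw [List.getElem_map, PySem.List.getElem_pyRange_one]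
    apply List.ext_getElem
    · rw [hFrows _ (List.getElem_mem h1), List.length_map, PySem.List.length_pyRange_one]
      omega
    · intro b h3 h4
      have hbN : b < N := by
        have := hFrows _ (List.getElem_mem h1); omega
      have hbn : (b : Int) < n := by
        rw [List.length_map, PySem.List.length_pyRange_one] at h4; omega
      rw [List.getElem_map, PySem.List.getElem_pyRange_one]
      have hL : (ts.foldl (fun A p => mkT_write A p.1 p.2) A0)[a][b]
          = mkT_get2 (ts.foldl (fun A p => mkT_write A p.1 p.2) A0) a b := by
        unfold mkT_get2
        rw [← getElem_eq_getD _ _ _ h1]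
        exact getElem_eq_getD _ _ _ h3
      rw [hL, fold_write_get2 N ts A0 hA0len hA0rows (by rw [hts]; exact ts_bounds n e)
            a b haN hbN]
      have hA00 : mkT_get2 A0 a b = 0 := by
        unfold mkT_get2
        have h5 : a < A0.length := by omega
        rw [← getElem_eq_getD _ _ _ h5]
        simp only [hA0, List.getElem_map]
        simp [List.getD_eq_getElem?_getD, hN ▸ hbN]
      rw [hA00]
      simp only [zero_add]
      exact ts_point n e a b han hbn

-- ===== VERDICT (by name: the statement is the Claim_ definition above) =====
theorem make_tournament_spec : Claim_equal_make_tournament := by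
  intro n edges_bits _
  unfold Spec_make_tournament
  exact make_tournament_eq_alt n edges_bits
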